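-- pv_equiv track=rewrite | github.com/Tritonn204/ledger-xelis | generators.py | format_rust_array
-- ===== SOURCE A (Python) =====
-- def format_rust_array(data: list, indent: int = 8) -> str:
--     """Format byte array as Rust syntax"""
--     lines = []
--     for i in range(0, len(data), 8):
--         chunk = data[i:i+8]
--         hex_values = [f"0x{b:02x}" for b in chunk]
--         line = " " * indent + ", ".join(hex_values)
--         if i + 8 < len(data):
--             line += ","
--         lines.append(line)
--     return "\n".join(lines)
-- ===== SOURCE B (Python) =====
-- def format_rust_array(data: list, indent: int = 8) -> str:
--     """Format byte array as Rust syntax"""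
--     out = []
--     for j, b in enumerate(data):
--         if j == 0:
--             out.append(" " * indent)
--         elif j % 8 == 0:
--             out.append(",\n" + " " * indent)
--         else:
--             out.append(", ")
--         out.append(f"0x{b:02x}")
--     return "".join(out)
-- ===== Notes on version B (the rewrite author's own statement) =====
-- stated objective: alternative
-- what changed: B replaces A's chunk-and-join construction (slice into groups of 8, join each group, conditionally append a comma, join lines) by a single flat pass over enumerate(data) that emits a per-element separator chosen from the index (indent at 0, ',\n'+indent at multiples of 8, ', ' otherwise) followed by the hex literal, with no slicing, no grouping and no line list.
import Mathlib
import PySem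

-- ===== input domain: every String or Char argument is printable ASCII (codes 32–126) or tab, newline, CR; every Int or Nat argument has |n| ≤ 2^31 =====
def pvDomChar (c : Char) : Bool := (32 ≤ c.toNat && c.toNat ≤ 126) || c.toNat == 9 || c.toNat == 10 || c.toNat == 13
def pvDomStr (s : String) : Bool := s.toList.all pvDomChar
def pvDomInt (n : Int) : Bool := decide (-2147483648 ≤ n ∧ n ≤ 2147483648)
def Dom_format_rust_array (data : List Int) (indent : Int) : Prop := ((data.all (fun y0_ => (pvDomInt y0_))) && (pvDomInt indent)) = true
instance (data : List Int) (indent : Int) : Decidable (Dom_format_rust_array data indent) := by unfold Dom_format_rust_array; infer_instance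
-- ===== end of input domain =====

-- B replaces A's chunk-of-8 slice/join loop with its conditional trailing comma by a single flat
-- pass over enumerate(data) that emits an index-derived separator before each hex literal (objective: alternative).

-- shared helper: Python's f"0x{b:02x}" (both Pythons build the same literal)
def hexDigit (n : Nat) : Char := if n < 10 then Char.ofNat (48 + n) else Char.ofNat (87 + n)

def hexNat (n : Nat) : List Char :=
  if h : n < 16 then [hexDigit n]
  else hexNat (n / 16) ++ [hexDigit (n % 16)]
termination_by n
decreasing_by exact Nat.div_lt_self (by omega) (by omega)

-- '%02x': negatives print '-' then the digits of |b| (width 2 never pads them); 0 ≤ b < 16 gets a leading '0'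
def hexLit (b : Int) : List Char :=
  '0' :: 'x' :: (if b < 0 then '-' :: hexNat b.natAbs
                 else if b < 16 then '0' :: hexNat b.toNat else hexNat b.toNat)

-- ===== PORT A =====
def format_rust_array (data : List Int) (indent : Int) : String :=
  let lines := (PySem.List.pyRange 0 (PySem.List.len data) 8).foldl
    (fun lines i =>
      let chunk := PySem.List.slice data (some i) (some (i + 8))
      let hex_values := chunk.map hexLit
      let line := List.replicate indent.toNat ' ' ++ PySem.Chars.join [',', ' '] hex_values
      let line := if i + 8 < PySem.List.len data then line ++ [','] else line
      lines ++ [line]) []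
  String.ofList (PySem.Chars.join ['\n'] lines)

-- ===== PORT B =====
def format_rust_array_alt (data : List Int) (indent : Int) : String :=
  let out := (PySem.List.enumerate data).foldl
    (fun out p =>
      let out :=
        if p.1 == 0 then out ++ [List.replicate indent.toNat ' ']
        else if PySem.Int.mod p.1 8 == 0 then out ++ [',' :: '\n' :: List.replicate indent.toNat ' ']
        else out ++ [[',', ' ']]
      out ++ [hexLit p.2]) []
  String.ofList (PySem.Chars.join [] out)

-- ===== PRECONDITION & SPEC =====
def Spec_format_rust_array (data : List Int) (indent : Int) (out : String) : Prop := out = format_rust_array_alt data indent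
instance (data : List Int) (indent : Int) (out : String) : Decidable (Spec_format_rust_array data indent out) := by unfold Spec_format_rust_array; infer_instance

-- ===== CLAIM (what is proved, stated in full; the proofs are below) =====
def Claim_equal_format_rust_array : Prop := ∀ (data : List Int) (indent : Int), Dom_format_rust_array data indent → Spec_format_rust_array data indent (format_rust_array data indent)

-- ===== LEMMAS AND PROOFS =====

-- ---- generic list/join helpers ----

theorem foldl_push {α β : Type} (f : α → β) :
    ∀ (l : List α) (acc : List β), l.foldl (fun acc i => acc ++ [f i]) acc = acc ++ l.map f := by
  intro l
  induction l with
  | nil => simp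
  | cons x xs ih => intro acc; simp [List.foldl, ih]

theorem join_nil_flatten (ps : List (List Char)) :
    PySem.Chars.join [] ps = ps.flatten := by
  induction ps with
  | nil => simp [PySem.Chars.join_nil]
  | cons p rest ih =>
    cases rest with
    | nil => simp [PySem.Chars.join_singleton]
    | cons q t => rw [PySem.Chars.join_cons_cons] at *; simp_all

theorem join_comma_head (h : List Char) (hs : List (List Char)) :
    PySem.Chars.join [',', ' '] (h :: hs) = h ++ (hs.map (fun x => [',', ' '] ++ x)).flatten := by
  induction hs generalizing h with
  | nil => simp [PySem.Chars.join_singleton]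
  | cons q t ih => rw [PySem.Chars.join_cons_cons, ih q]; simp

theorem pyRange8_nil (a n : Int) (h : n ≤ a) : PySem.List.pyRange a n 8 = [] := by
  rw [PySem.List.pyRange_of_pos a n (by norm_num)]
  simp [show ¬ a < n by omega]

theorem pyRange8_cons (a n : Int) (h : a < n) :
    PySem.List.pyRange a n 8 = a :: PySem.List.pyRange (a + 8) n 8 := by
  rw [PySem.List.pyRange_of_pos a n (by norm_num),
      PySem.List.pyRange_of_pos (a + 8) n (by norm_num)]
  have hc : ((n - a + 8 - 1) / 8).toNat
      = (if a + 8 < n then ((n - (a + 8) + 8 - 1) / 8).toNat else 0) + 1 := by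
    split_ifs with h8 <;> omega
  rw [if_pos h, hc, List.range_succ_eq_map]
  simp only [List.map_cons, List.map_map]
  refine List.cons_eq_cons.mpr ⟨by norm_num, ?_⟩
  split_ifs <;> · apply List.map_congr_left; intro k _; simp; push_cast; ring

theorem join_cons (sep p : List Char) (ls : List (List Char)) (h : ls ≠ []) :
    PySem.Chars.join sep (p :: ls) = p ++ sep ++ PySem.Chars.join sep ls := by
  cases ls with
  | nil => exact absurd rfl h
  | cons q rest => exact PySem.Chars.join_cons_cons sep p q rest

-- ---- A-side: the chunk loop as a ",\n"-join of lines (carried over from the range recursion) ----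

theorem join_mark (g : Int → List Char) (n : Int) :
    ∀ (k : Nat) (a : Int), (n - a).toNat ≤ k →
      PySem.Chars.join ['\n']
        ((PySem.List.pyRange a n 8).map fun i => if i + 8 < n then (g i) ++ [','] else g i)
      = PySem.Chars.join [',', '\n'] ((PySem.List.pyRange a n 8).map g) := by
  intro k
  induction k with
  | zero =>
    intro a ha
    rw [pyRange8_nil a n (by omega)]
    simp
  | succ k ih =>
    intro a ha
    by_cases h : a < n
    · rw [pyRange8_cons a n h]
      by_cases h8 : a + 8 < n
      · have hT : PySem.List.pyRange (a + 8) n 8 ≠ [] := by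
          rw [pyRange8_cons (a + 8) n h8]; exact List.cons_ne_nil _ _
        simp only [List.map_cons, if_pos h8]
        rw [join_cons _ _ _ (by simpa using hT), join_cons _ _ _ (by simpa using hT),
            ih (a + 8) (by omega)]
        simp
      · rw [pyRange8_nil (a + 8) n (by omega)]
        simp [PySem.Chars.join_singleton, if_neg h8]
    · rw [pyRange8_nil a n (by omega)]
      simp

-- ---- B-side: the flat separator pass as a recursion over the hex list ----

-- B's separator before the element at (Nat) index j
def bSep (ind : List Char) (j : Nat) : List Char :=
  if j = 0 then ind else if j % 8 = 0 then ',' :: '\n' :: ind else [',', ' ']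

-- B's whole output from index j on, over the already-formatted hex literals
def bgo (ind : List Char) : Nat → List (List Char) → List Char
  | _, [] => []
  | j, h :: t => bSep ind j ++ h ++ bgo ind (j + 1) t

theorem bgo_mod (ind : List Char) :
    ∀ (t : List (List Char)) (j j' : Nat), j ≠ 0 → j' ≠ 0 → j % 8 = j' % 8 →
      bgo ind j t = bgo ind j' t := by
  intro t
  induction t with
  | nil => intro j j' _ _ _; rfl
  | cons h t ih =>
    intro j j' hj hj' hm
    simp only [bgo, bSep, if_neg hj, if_neg hj', hm]
    rw [ih (j + 1) (j' + 1) (by omega) (by omega) (by omega)]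

theorem bgo_inner (ind : List Char) :
    ∀ (t : List (List Char)) (j : Nat), j % 8 ≠ 0 →
      bgo ind j t = ((t.take (8 - j % 8)).map (fun h => [',', ' '] ++ h)).flatten
        ++ bgo ind 8 (t.drop (8 - j % 8)) := by
  intro t
  induction t with
  | nil => intro j _; simp [bgo]
  | cons h t ih =>
    intro j hj
    have hj0 : j ≠ 0 := by omega
    have hr : 1 ≤ 8 - j % 8 ∧ 8 - j % 8 ≤ 7 := by omega
    simp only [bgo, bSep, if_neg hj0, if_neg hj]
    by_cases h1 : j % 8 = 7
    · have : 8 - j % 8 = 1 := by omega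
      rw [this]
      have : bgo ind (j + 1) t = bgo ind 8 t :=
        bgo_mod ind t (j + 1) 8 (by omega) (by omega) (by omega)
      simp [this]
    · have hs : 8 - (j + 1) % 8 = 8 - j % 8 - 1 := by omega
      rw [ih (j + 1) (by omega), hs]
      have htake : (h :: t).take (8 - j % 8) = h :: t.take (8 - j % 8 - 1) := by
        have : 8 - j % 8 = (8 - j % 8 - 1) + 1 := by omega
        rw [this, List.take_succ_cons]; simp
      have hdrop : (h :: t).drop (8 - j % 8) = t.drop (8 - j % 8 - 1) := by
        have : 8 - j % 8 = (8 - j % 8 - 1) + 1 := by omega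
        rw [this, List.drop_succ_cons]; simp
      rw [htake, hdrop]
      simp

-- the line A builds for chunk start i (before the trailing-comma branch)
def lineAt (data : List Int) (ind : List Char) (i : Int) : List Char :=
  ind ++ PySem.Chars.join [',', ' '] ((PySem.List.slice data (some i) (some (i + 8))).map hexLit)

theorem bgo_chunks (data : List Int) (ind : List Char) :
    ∀ (k : Nat) (a : Nat), a % 8 = 0 → a < data.length → data.length - a ≤ k →
      bgo ind a ((data.map hexLit).drop a)
        = (if a = 0 then ([] : List Char) else [',', '\n'])
          ++ PySem.Chars.join [',', '\n']
               ((PySem.List.pyRange (a : Int) (data.length : Int) 8).map (lineAt data ind)) := by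
  intro k
  induction k with
  | zero => intro a _ ha hk; omega
  | succ k ih =>
    intro a ha8 haL hk
    set H := data.map hexLit with hH
    have haH : a < H.length := by simpa [hH] using haL
    have hdrop : H.drop a = H[a] :: H.drop (a + 1) := List.drop_eq_getElem_cons haH
    rw [hdrop]
    show bSep ind a ++ H[a] ++ bgo ind (a + 1) (H.drop (a + 1)) = _
    have hsep : bSep ind a = (if a = 0 then ([] : List Char) else [',', '\n']) ++ ind := by
      unfold bSep
      by_cases h0 : a = 0
      · simp [h0]
      · simp [h0, ha8]
    rw [hsep]
    rw [bgo_inner ind (H.drop (a + 1)) (a + 1) (by omega)]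
    have h71 : 8 - (a + 1) % 8 = 7 := by omega
    rw [h71]
    have hdd : (H.drop (a + 1)).drop 7 = H.drop (a + 8) := by
      rw [List.drop_drop]
    have hchunk : PySem.List.slice data (some (a : Int)) (some ((a : Int) + 8))
        = (data.drop a).take 8 := by
      have := PySem.List.slice_natCast_add data a 8
      simpa using this
    have hline : lineAt data ind (a : Int)
        = ind ++ H[a] ++ (((H.drop (a + 1)).take 7).map (fun h => [',', ' '] ++ h)).flatten := by
      unfold lineAt
      rw [hchunk]
      have htk : ((data.drop a).take 8).map hexLit = (H.drop a).take 8 := by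
        simp [hH]
      rw [htk, hdrop]
      have : (H[a] :: H.drop (a + 1)).take 8 = H[a] :: (H.drop (a + 1)).take 7 := by
        rw [show (8 : Nat) = 7 + 1 from rfl, List.take_succ_cons]
      rw [this, join_comma_head]
      simp
    by_cases h8 : a + 8 < data.length
    · have hbgo8 : bgo ind 8 (H.drop (a + 8)) = bgo ind (a + 8) (H.drop (a + 8)) :=
        bgo_mod ind _ 8 (a + 8) (by omega) (by omega) (by omega)
      rw [hdd, hbgo8]
      have hcast : ((a : Int) + 8) = ((a + 8 : Nat) : Int) := by push_cast; ring
      have hrec := ih (a + 8) (by omega) h8 (by omega)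
      rw [if_neg (by omega)] at hrec
      have hrange : PySem.List.pyRange (a : Int) (data.length : Int) 8
          = (a : Int) :: PySem.List.pyRange ((a : Int) + 8) (data.length : Int) 8 :=
        pyRange8_cons _ _ (by exact_mod_cast haL)
      have hT : PySem.List.pyRange ((a : Int) + 8) (data.length : Int) 8 ≠ [] := by
        rw [pyRange8_cons _ _ (by exact_mod_cast h8)]; exact List.cons_ne_nil _ _
      rw [hrange, List.map_cons, join_cons _ _ _ (by simpa using hT)]
      rw [hrec, hcast] at *
      rw [hline]
      simp
    · have hdd0 : H.drop (a + 8) = [] := by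
        apply List.drop_eq_nil_of_le
        simp [hH]; omega
      rw [hdd, hdd0]
      have hrange : PySem.List.pyRange (a : Int) (data.length : Int) 8 = [(a : Int)] := by
        rw [pyRange8_cons _ _ (by exact_mod_cast haL), pyRange8_nil _ _ (by exact_mod_cast (by omega : data.length ≤ a + 8))]
      rw [hrange]
      simp only [List.map_cons, List.map_nil, PySem.Chars.join_singleton]
      rw [hline]
      simp [bgo]

-- B's foldl over enumerate produces exactly the separator/hex pieces
def bPieces (ind : List Char) : Nat → List Int → List (List Char)
  | _, [] => []
  | j, b :: t => bSep ind j :: hexLit b :: bPieces ind (j + 1) t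

theorem foldB (ind : List Char) :
    ∀ (l : List Int) (j : Nat) (acc : List (List Char)),
      (PySem.List.enumerate l (j : Int)).foldl
        (fun out (p : Int × Int) =>
          (if p.1 == 0 then out ++ [ind]
           else if PySem.Int.mod p.1 8 == 0 then out ++ [',' :: '\n' :: ind]
           else out ++ [[',', ' ']]) ++ [hexLit p.2]) acc
      = acc ++ bPieces ind j l := by
  intro l
  induction l with
  | nil => intro j acc; simp [PySem.List.enumerate_nil, bPieces]
  | cons b t ih =>
    intro j acc
    rw [PySem.List.enumerate_cons, List.foldl_cons]
    have hcast : ((j : Int) + 1) = ((j + 1 : Nat) : Int) := by push_cast; ring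
    rw [hcast, ih]
    have hsepEq : (if (j : Int) == 0 then acc ++ [ind]
        else if PySem.Int.mod (j : Int) 8 == 0 then acc ++ [',' :: '\n' :: ind]
        else acc ++ [[',', ' ']]) = acc ++ [bSep ind j] := by
      unfold bSep
      by_cases h0 : j = 0
      · simp [h0]
      · rw [if_neg (by simpa using (by exact_mod_cast h0 : (j : Int) ≠ 0))]
        rw [if_neg h0]
        have : PySem.Int.mod (j : Int) 8 = ((j % 8 : Nat) : Int) := by
          exact_mod_cast PySem.Int.mod_natCast j 8
        rw [this]
        by_cases h8 : j % 8 = 0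
        · simp [h8]
        · rw [if_neg (by simpa using (by exact_mod_cast h8 : ((j % 8 : Nat) : Int) ≠ 0))]
          simp [h8]
    rw [hsepEq]
    simp [bPieces]

theorem bPieces_flatten (ind : List Char) :
    ∀ (l : List Int) (j : Nat), (bPieces ind j l).flatten = bgo ind j (l.map hexLit) := by
  intro l
  induction l with
  | nil => intro j; simp [bPieces, bgo]
  | cons b t ih => intro j; simp [bPieces, bgo, ih]

-- B's port equals the bgo recursion
theorem alt_eq_bgo (data : List Int) (indent : Int) :
    format_rust_array_alt data indent
      = String.ofList (bgo (List.replicate indent.toNat ' ') 0 (data.map hexLit)) := by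
  unfold format_rust_array_alt
  rw [show PySem.List.enumerate data = PySem.List.enumerate data ((0 : Nat) : Int) by norm_num]
  rw [foldB]
  simp only [List.nil_append, join_nil_flatten, bPieces_flatten]

-- A's port equals the ",\n"-join of its lines
theorem a_eq_join (data : List Int) (indent : Int) :
    format_rust_array data indent
      = String.ofList (PySem.Chars.join [',', '\n']
          ((PySem.List.pyRange 0 (data.length : Int) 8).map
            (lineAt data (List.replicate indent.toNat ' ')))) := by
  unfold format_rust_array
  simp only [foldl_push, List.nil_append, PySem.List.len_eq]
  congr 1
  exact join_mark (lineAt data (List.replicate indent.toNat ' '))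
    (data.length : Int) data.length 0 (by omega)

-- ===== VERDICT (by name: the statement is the Claim_ definition above) =====
theorem format_rust_array_spec : Claim_equal_format_rust_array := by
  intro data indent _
  unfold Spec_format_rust_array
  rw [a_eq_join, alt_eq_bgo]
  by_cases hnil : data = []
  · subst hnil
    rw [show ((([] : List Int).length : Int)) = 0 by simp, pyRange8_nil 0 0 (by omega)]
    simp [bgo]
  · have hlen : 0 < data.length := List.length_pos_iff.mpr hnil
    have := bgo_chunks data (List.replicate indent.toNat ' ') data.length 0 (by omega) hlen (by omega)
    rw [if_pos rfl, List.nil_append, List.drop_zero] at this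
    rw [show ((0 : Nat) : Int) = (0 : Int) by norm_num] at this
    rw [this]
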